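-- pv_equiv track=rewrite | github.com/lizhiquan/advent-of-code | 2024/day-10/main.py | part_two
-- ===== SOURCE A (Python) =====
-- def part_two(map):
--     directions = [(0, 1), (1, 0), (0, -1), (-1, 0)]
--     visited = {}
--
--     def dfs(i, j):
--         if (i, j) in visited:
--             return visited[(i, j)]
--         if map[i][j] == 9:
--             visited[(i, j)] = 1
--             return 1
--
--         rating = 0
--         for dr, dc in directions:
--             nr, nc = i + dr, j + dc
--             if nr < 0 or nr >= len(map) or nc < 0 or nc >= len(map[nr]):
--                 continue
--             if map[nr][nc] == map[i][j] + 1: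
--                 rating += dfs(nr, nc)
--         visited[(i, j)] = rating
--         return rating
--
--     rating = 0
--     for r in range(len(map)):
--         for c in range(len(map[r])):
--             if map[r][c] == 0:
--                 rating += dfs(r, c)
--     return rating
-- ===== SOURCE B (Python) =====
-- def part_two(map):
--     # Bottom-up DP: visit cells in decreasing order of value, so every cell's
--     # rating can be read off the already-filled ratings of its value+1 neighbours.
--     cells = [(x, i, j) for i, row in enumerate(map) for j, x in enumerate(row)]
--     cells.sort(key=lambda t: t[0], reverse=True)
--     rating = {}
--     for v, i, j in cells:
--         if v == 9:
--             rating[(i, j)] = 1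
--         else:
--             s = 0
--             for dr, dc in ((0, 1), (1, 0), (0, -1), (-1, 0)):
--                 nr, nc = i + dr, j + dc
--                 if 0 <= nr < len(map) and 0 <= nc < len(map[nr]) and map[nr][nc] == v + 1:
--                     s += rating.get((nr, nc), 0)
--             rating[(i, j)] = s
--     return sum(rating.get((i, j), 0) for i, row in enumerate(map) for j, x in enumerate(row) if x == 0)
-- ===== Notes on version B (the rewrite author's own statement) =====
-- stated objective: alternative
-- what changed: Replaces A's memoized recursive DFS from each trailhead with a bottom-up dynamic program: all cells are sorted by value in decreasing order and a rating table is filled in one pass (9-cells get 1, each other cell sums the ratings of its value+1 neighbours), the answer being the table summed over 0-cells.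
import Mathlib
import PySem

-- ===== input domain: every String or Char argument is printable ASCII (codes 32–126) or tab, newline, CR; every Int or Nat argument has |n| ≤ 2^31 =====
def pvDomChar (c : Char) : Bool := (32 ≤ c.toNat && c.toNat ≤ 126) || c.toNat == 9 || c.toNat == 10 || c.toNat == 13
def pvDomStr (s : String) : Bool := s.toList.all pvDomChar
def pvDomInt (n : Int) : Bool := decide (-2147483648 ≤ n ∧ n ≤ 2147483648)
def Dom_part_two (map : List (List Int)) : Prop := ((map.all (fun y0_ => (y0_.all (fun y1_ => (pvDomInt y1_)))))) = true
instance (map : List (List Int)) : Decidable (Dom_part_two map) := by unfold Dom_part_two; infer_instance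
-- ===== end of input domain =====

-- B replaces A's memoized recursive DFS with a bottom-up table filled in decreasing
-- order of cell value (alternative decomposition; same asymptotic cost up to the
-- number of distinct values).

-- shared cell accessor: map[i][j]; only ever used at indices both ports have bounds-checked
def pvCell (map : List (List Int)) (i j : Int) : Int :=
  (map.getD i.toNat []).getD j.toNat 0

-- the four directions, shared literal constant of both ports
def pvDirs : List (Int × Int) := [(0, 1), (1, 0), (0, -1), (-1, 0)]

-- ===== PORT A =====
-- dfs with the visited memo dict threaded through; the Nat fuel only makes the
-- recursion structural — part_two supplies fuel (number of cells + 1) that is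
-- proved never to run out (each recursive step moves to a strictly larger cell value)
def pvDfs (map : List (List Int)) : Nat → Int → Int → PySem.Dict (Int × Int) Int →
    Int × PySem.Dict (Int × Int) Int
  | 0, _, _, vis => (0, vis)
  | f + 1, i, j, vis =>
    match vis.get? (i, j) with
    | some x => (x, vis)
    | none =>
      if pvCell map i j = 9 then (1, vis.insert (i, j) 1)
      else
        let st := pvDirs.foldl (fun (st : Int × PySem.Dict (Int × Int) Int) d =>
          let nr := i + d.1
          let nc := j + d.2
          if nr < 0 ∨ PySem.List.len map ≤ nr ∨ nc < 0 ∨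
              PySem.List.len (map.getD nr.toNat []) ≤ nc then st
          else if pvCell map nr nc = pvCell map i j + 1 then
            let r := pvDfs map f nr nc st.2
            (st.1 + r.1, r.2)
          else st) (0, vis)
        (st.1, st.2.insert (i, j) st.1)

def part_two (map : List (List Int)) : Int :=
  ((PySem.List.pyRange 0 (PySem.List.len map) 1).foldl
    (fun (st : Int × PySem.Dict (Int × Int) Int) r =>
      (PySem.List.pyRange 0 (PySem.List.len (map.getD r.toNat [])) 1).foldl
        (fun st c =>
          if pvCell map r c = 0 then
            let res := pvDfs map (map.flatten.length + 1) r c st.2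
            (st.1 + res.1, res.2)
          else st) st)
    (0, PySem.Dict.empty)).1

-- ===== PORT B =====
-- bottom-up: all cells sorted by value, largest first; every cell's rating is read
-- off the already-filled ratings of its value-(v+1) neighbours
def part_two_alt (map : List (List Int)) : Int :=
  let cells := (PySem.List.enumerate map).flatMap (fun iRow =>
    (PySem.List.enumerate iRow.2).map (fun jx => (jx.2, iRow.1, jx.1)))
  let cellsSorted := PySem.List.sorted cells (fun t => t.1) true
  let rating := cellsSorted.foldl (fun (rt : PySem.Dict (Int × Int) Int) t =>
    if t.1 = 9 then rt.insert (t.2.1, t.2.2) 1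
    else
      let s := pvDirs.foldl (fun (s : Int) d =>
        let nr := t.2.1 + d.1
        let nc := t.2.2 + d.2
        if 0 ≤ nr ∧ nr < PySem.List.len map ∧ 0 ≤ nc ∧
            nc < PySem.List.len (map.getD nr.toNat []) ∧ pvCell map nr nc = t.1 + 1 then
          s + rt.getD (nr, nc) 0
        else s) 0
      rt.insert (t.2.1, t.2.2) s) PySem.Dict.empty
  (PySem.List.enumerate map).foldl (fun (acc : Int) iRow =>
    (PySem.List.enumerate iRow.2).foldl (fun acc jx =>
      if jx.2 = 0 then acc + rating.getD (iRow.1, jx.1) 0 else acc) acc) 0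

-- ===== PRECONDITION & SPEC =====
def Spec_part_two (map : List (List Int)) (out : Int) : Prop := out = part_two_alt map
instance (map : List (List Int)) (out : Int) : Decidable (Spec_part_two map out) := by
  unfold Spec_part_two; infer_instance

-- ===== CLAIM (what is proved, stated in full; the proofs are below) =====
def Claim_equal_part_two : Prop := ∀ (map : List (List Int)), Dom_part_two map → Spec_part_two map (part_two map)

-- ===== LEMMAS AND PROOFS =====

-- in-bounds cell (the condition both ports check before touching a neighbour)
def pvOk (map : List (List Int)) (i j : Int) : Prop :=
  0 ≤ i ∧ i < (map.length : Int) ∧ 0 ≤ j ∧ j < ((map.getD i.toNat []).length : Int)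

-- pure reference rating, fuel-indexed (same recursion both programs compute)
def pvRat (map : List (List Int)) : Nat → Int → Int → Int
  | 0, _, _ => 0
  | f + 1, i, j =>
    if pvCell map i j = 9 then 1
    else (pvDirs.map (fun d =>
      if 0 ≤ i + d.1 ∧ i + d.1 < PySem.List.len map ∧ 0 ≤ j + d.2 ∧
          j + d.2 < PySem.List.len (map.getD (i + d.1).toNat []) ∧
          pvCell map (i + d.1) (j + d.2) = pvCell map i j + 1 then
        pvRat map f (i + d.1) (j + d.2)
      else 0)).sum

-- the true rating: fuel one more than the number of cells always suffices
def pvTR (map : List (List Int)) (i j : Int) : Int := pvRat map (map.flatten.length + 1) i j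

-- recursion measure: number of cells with value > v
def pvM (map : List (List Int)) (v : Int) : Nat :=
  (map.flatten.filter (fun x => decide (v < x))).length

lemma pv_filter_lt (l : List Int) (p q : Int → Bool) (himp : ∀ x, q x = true → p x = true) :
    ∀ a ∈ l, p a → ¬ q a → (l.filter q).length < (l.filter p).length := by
  intro a ha hp hq
  have hle : ∀ (t : List Int), (t.filter q).length ≤ (t.filter p).length := by
    intro t
    exact List.Sublist.length_le (List.monotone_filter_right t himp)
  induction l with
  | nil => simp at ha
  | cons b t ih =>
    rcases List.mem_cons.mp ha with rfl | hb
    · simp [hp, hq]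
      exact hle t
    · simp only [List.filter_cons]
      have := ih hb
      cases hqb : q b
      · cases hpb : p b <;> simp <;> omega
      · have hpb : p b = true := himp b hqb
        simp [hpb]
        omega

lemma pvCell_mem_flatten (map : List (List Int)) (i j : Int) (h : pvOk map i j) :
    pvCell map i j ∈ map.flatten := by
  obtain ⟨h1, h2, h3, h4⟩ := h
  have hi : i.toNat < map.length := by omega
  have hrow : map.getD i.toNat [] = map[i.toNat] := List.getD_eq_getElem map [] hi
  have hj : j.toNat < (map.getD i.toNat []).length := by omega
  refine List.mem_flatten.mpr ⟨map[i.toNat], List.getElem_mem hi, ?_⟩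
  rw [pvCell, hrow, List.getD_eq_getElem _ 0 (hrow ▸ hj)]
  exact List.getElem_mem _

lemma pvM_le (map : List (List Int)) (v : Int) : pvM map v ≤ map.flatten.length :=
  List.length_filter_le _ _

lemma pvM_lt (map : List (List Int)) (nr nc v : Int) (h : pvOk map nr nc)
    (hc : pvCell map nr nc = v + 1) : pvM map (v + 1) < pvM map v := by
  have hm : (v + 1) ∈ map.flatten := hc ▸ pvCell_mem_flatten map nr nc h
  exact pv_filter_lt map.flatten _ _ (by intro x hx; simp at hx ⊢; omega) (v + 1) hm
    (by simp) (by simp)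

lemma pvRat_stable (map : List (List Int)) :
    ∀ n (i j : Int) (f1 f2 : Nat), pvOk map i j → pvM map (pvCell map i j) ≤ n →
      n < f1 → n < f2 → pvRat map f1 i j = pvRat map f2 i j := by
  intro n
  induction n using Nat.strong_induction_on with
  | _ n ih =>
    intro i j f1 f2 hok hm h1 h2
    match f1, f2 with
    | a + 1, b + 1 =>
      by_cases h9 : pvCell map i j = 9
      · simp [pvRat, h9]
      · simp only [pvRat, if_neg h9]
        congr 1
        apply List.map_congr_left
        intro d _
        by_cases hc : 0 ≤ i + d.1 ∧ i + d.1 < PySem.List.len map ∧ 0 ≤ j + d.2 ∧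
            j + d.2 < PySem.List.len (map.getD (i + d.1).toNat []) ∧
            pvCell map (i + d.1) (j + d.2) = pvCell map i j + 1
        · rw [if_pos hc, if_pos hc]
          obtain ⟨c1, c2, c3, c4, c5⟩ := hc
          rw [PySem.List.len_eq] at c2 c4
          have hokn : pvOk map (i + d.1) (j + d.2) := ⟨c1, by exact_mod_cast c2, c3, by exact_mod_cast c4⟩
          have hlt := pvM_lt map _ _ (pvCell map i j) hokn c5
          exact ih (pvM map (pvCell map i j + 1)) (by omega) _ _ a b hokn
            (by rw [c5]) (by omega) (by omega)
        · rw [if_neg hc, if_neg hc]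

lemma pvRat_eq_TR (map : List (List Int)) (i j : Int) (f : Nat) (h : pvOk map i j)
    (hf : pvM map (pvCell map i j) < f) : pvRat map f i j = pvTR map i j := by
  have := pvRat_stable map (pvM map (pvCell map i j)) i j f (map.flatten.length + 1) h
    le_rfl hf (Nat.lt_succ_of_le (pvM_le map _))
  exact this

lemma pvTR_nine (map : List (List Int)) (i j : Int) (h9 : pvCell map i j = 9) :
    pvTR map i j = 1 := by
  simp [pvTR, pvRat, h9]

lemma pvTR_unfold (map : List (List Int)) (i j : Int) (_h : pvOk map i j)
    (h9 : pvCell map i j ≠ 9) :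
    pvTR map i j = (pvDirs.map (fun d =>
      if 0 ≤ i + d.1 ∧ i + d.1 < PySem.List.len map ∧ 0 ≤ j + d.2 ∧
          j + d.2 < PySem.List.len (map.getD (i + d.1).toNat []) ∧
          pvCell map (i + d.1) (j + d.2) = pvCell map i j + 1 then
        pvTR map (i + d.1) (j + d.2)
      else 0)).sum := by
  rw [pvTR]
  simp only [pvRat, if_neg h9]
  congr 1
  apply List.map_congr_left
  intro d _
  by_cases hc : 0 ≤ i + d.1 ∧ i + d.1 < PySem.List.len map ∧ 0 ≤ j + d.2 ∧
      j + d.2 < PySem.List.len (map.getD (i + d.1).toNat []) ∧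
      pvCell map (i + d.1) (j + d.2) = pvCell map i j + 1
  · rw [if_pos hc, if_pos hc]
    obtain ⟨c1, c2, c3, c4, c5⟩ := hc
    rw [PySem.List.len_eq] at c2 c4
    have hokn : pvOk map (i + d.1) (j + d.2) := ⟨c1, by exact_mod_cast c2, c3, by exact_mod_cast c4⟩
    have hlt := pvM_lt map _ _ (pvCell map i j) hokn c5
    have hle := pvM_le map (pvCell map i j)
    exact pvRat_eq_TR map _ _ _ hokn (by rw [c5]; omega)
  · rw [if_neg hc, if_neg hc]

-- every entry of the dict is the true rating of a valid cell
def pvGood (map : List (List Int)) (d : PySem.Dict (Int × Int) Int) : Prop :=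
  ∀ p x, d.get? p = some x → pvOk map p.1 p.2 ∧ x = pvTR map p.1 p.2

lemma pvGood_empty (map : List (List Int)) : pvGood map PySem.Dict.empty := by
  intro p x h; simp [PySem.Dict.get?_empty] at h

lemma pvGood_insert (map : List (List Int)) (d : PySem.Dict (Int × Int) Int) (i j x : Int)
    (hg : pvGood map d) (hok : pvOk map i j) (hx : x = pvTR map i j) :
    pvGood map (d.insert (i, j) x) := by
  intro p y h
  rw [PySem.Dict.get?_insert] at h
  by_cases hp : p = (i, j)
  · subst hp; simp at h; subst h; exact ⟨hok, hx⟩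
  · simp [hp] at h; exact hg p y h

lemma pvGood_insert_get? (map : List (List Int)) (d : PySem.Dict (Int × Int) Int)
    (k : Int × Int) (hg : pvGood map d) (p : Int × Int) (y : Int)
    (h : d.get? p = some y) : (d.insert k (pvTR map k.1 k.2)).get? p = some y := by
  rw [PySem.Dict.get?_insert]
  by_cases hp : p = k
  · subst hp; obtain ⟨_, hy⟩ := hg p y h; simp [hy]
  · simp [hp, h]

-- ===== A-side: dfs computes the true rating and keeps the memo good =====
lemma pvDfs_correct (map : List (List Int)) :
    ∀ n (f : Nat) (i j : Int) (vis : PySem.Dict (Int × Int) Int),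
      pvOk map i j → pvM map (pvCell map i j) ≤ n → n < f → pvGood map vis →
      (pvDfs map f i j vis).1 = pvTR map i j ∧ pvGood map (pvDfs map f i j vis).2 := by
  intro n
  induction n using Nat.strong_induction_on with
  | _ n ih =>
    intro f i j vis hok hm hf hg
    match f with
    | a + 1 =>
    cases hv : vis.get? (i, j) with
    | some x =>
      simp only [pvDfs, hv]
      obtain ⟨h1, h2⟩ := hg (i, j) x hv
      exact ⟨by simpa using h2, hg⟩
    | none =>
      by_cases h9 : pvCell map i j = 9
      · simp only [pvDfs, hv, if_pos h9]
        exact ⟨(pvTR_nine map i j h9).symm, pvGood_insert map vis i j 1 hg hok (pvTR_nine map i j h9).symm⟩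
      · simp only [pvDfs, hv, if_neg h9]
        have inner : ∀ (l : List (Int × Int)) (s0 : Int) (v0 : PySem.Dict (Int × Int) Int),
            pvGood map v0 →
            (l.foldl (fun (st : Int × PySem.Dict (Int × Int) Int) d =>
              let nr := i + d.1
              let nc := j + d.2
              if nr < 0 ∨ PySem.List.len map ≤ nr ∨ nc < 0 ∨
                  PySem.List.len (map.getD nr.toNat []) ≤ nc then st
              else if pvCell map nr nc = pvCell map i j + 1 then
                let r := pvDfs map a nr nc st.2
                (st.1 + r.1, r.2)
              else st) (s0, v0)).1 =
              s0 + (l.map (fun d =>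
                if 0 ≤ i + d.1 ∧ i + d.1 < PySem.List.len map ∧ 0 ≤ j + d.2 ∧
                    j + d.2 < PySem.List.len (map.getD (i + d.1).toNat []) ∧
                    pvCell map (i + d.1) (j + d.2) = pvCell map i j + 1 then
                  pvTR map (i + d.1) (j + d.2)
                else 0)).sum ∧
            pvGood map (l.foldl (fun (st : Int × PySem.Dict (Int × Int) Int) d =>
              let nr := i + d.1
              let nc := j + d.2
              if nr < 0 ∨ PySem.List.len map ≤ nr ∨ nc < 0 ∨
                  PySem.List.len (map.getD nr.toNat []) ≤ nc then st
              else if pvCell map nr nc = pvCell map i j + 1 then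
                let r := pvDfs map a nr nc st.2
                (st.1 + r.1, r.2)
              else st) (s0, v0)).2 := by
          intro l
          induction l with
          | nil => intro s0 v0 hg0; exact ⟨by simp, hg0⟩
          | cons d t iht =>
            intro s0 v0 hg0
            simp only [List.foldl_cons, List.map_cons, List.sum_cons]
            by_cases hbad : i + d.1 < 0 ∨ PySem.List.len map ≤ i + d.1 ∨ j + d.2 < 0 ∨
                PySem.List.len (map.getD (i + d.1).toNat []) ≤ j + d.2
            · have hnc : ¬ (0 ≤ i + d.1 ∧ i + d.1 < PySem.List.len map ∧ 0 ≤ j + d.2 ∧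
                  j + d.2 < PySem.List.len (map.getD (i + d.1).toNat []) ∧
                  pvCell map (i + d.1) (j + d.2) = pvCell map i j + 1) := by
                intro hcon
                exact absurd hbad (by push Not; exact ⟨by omega, by omega, by omega, by omega⟩)
              simp only [if_pos hbad, if_neg hnc]
              obtain ⟨w1, w2⟩ := iht s0 v0 hg0
              exact ⟨by rw [w1]; ring, w2⟩
            · by_cases hceq : pvCell map (i + d.1) (j + d.2) = pvCell map i j + 1
              · have hc : 0 ≤ i + d.1 ∧ i + d.1 < PySem.List.len map ∧ 0 ≤ j + d.2 ∧
                    j + d.2 < PySem.List.len (map.getD (i + d.1).toNat []) ∧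
                    pvCell map (i + d.1) (j + d.2) = pvCell map i j + 1 := by
                  push Not at hbad
                  exact ⟨by omega, by omega, by omega, by omega, hceq⟩
                have hokn : pvOk map (i + d.1) (j + d.2) := by
                  obtain ⟨c1, c2, c3, c4, _⟩ := hc
                  rw [PySem.List.len_eq] at c2 c4
                  exact ⟨c1, by exact_mod_cast c2, c3, by exact_mod_cast c4⟩
                have hlt := pvM_lt map _ _ (pvCell map i j) hokn hceq
                obtain ⟨r1, r2⟩ := ih (pvM map (pvCell map (i + d.1) (j + d.2)))
                  (by rw [hceq]; omega) a (i + d.1) (j + d.2) v0 hokn le_rfl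
                  (by rw [hceq]; omega) hg0
                simp only [if_neg hbad, if_pos hceq, if_pos hc]
                obtain ⟨w1, w2⟩ := iht (s0 + (pvDfs map a (i + d.1) (j + d.2) v0).1)
                  (pvDfs map a (i + d.1) (j + d.2) v0).2 r2
                refine ⟨?_, w2⟩
                rw [w1, r1]; ring
              · have hnc : ¬ (0 ≤ i + d.1 ∧ i + d.1 < PySem.List.len map ∧ 0 ≤ j + d.2 ∧
                    j + d.2 < PySem.List.len (map.getD (i + d.1).toNat []) ∧
                    pvCell map (i + d.1) (j + d.2) = pvCell map i j + 1) := by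
                  intro hcon; exact hceq hcon.2.2.2.2
                simp only [if_neg hbad, if_neg hceq, if_neg hnc]
                obtain ⟨w1, w2⟩ := iht s0 v0 hg0
                exact ⟨by rw [w1]; ring, w2⟩
        obtain ⟨w1, w2⟩ := inner pvDirs 0 vis hg
        constructor
        · simp only [w1, zero_add]
          exact (pvTR_unfold map i j hok h9).symm
        · exact pvGood_insert map _ i j _ w2 hok (by rw [w1, zero_add]; exact (pvTR_unfold map i j hok h9).symm)

-- the pure value both ports are proved to return
def pvAns (map : List (List Int)) : Int :=
  ((PySem.List.pyRange 0 (PySem.List.len map) 1).map (fun r =>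
    ((PySem.List.pyRange 0 (PySem.List.len (map.getD r.toNat [])) 1).map (fun c =>
      if pvCell map r c = 0 then pvTR map r c else 0)).sum)).sum

lemma part_two_eq_ans (map : List (List Int)) : part_two map = pvAns map := by
  have hinner : ∀ (r : Int), 0 ≤ r → r < (map.length : Int) → ∀ (cs : List Int),
      (∀ c ∈ cs, 0 ≤ c ∧ c < ((map.getD r.toNat []).length : Int)) →
      ∀ (st : Int × PySem.Dict (Int × Int) Int), pvGood map st.2 →
      (cs.foldl (fun (st : Int × PySem.Dict (Int × Int) Int) c =>
        if pvCell map r c = 0 then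
          (st.1 + (pvDfs map (map.flatten.length + 1) r c st.2).1,
            (pvDfs map (map.flatten.length + 1) r c st.2).2)
        else st) st).1 =
        st.1 + (cs.map (fun c => if pvCell map r c = 0 then pvTR map r c else 0)).sum ∧
      pvGood map ((cs.foldl (fun (st : Int × PySem.Dict (Int × Int) Int) c =>
        if pvCell map r c = 0 then
          (st.1 + (pvDfs map (map.flatten.length + 1) r c st.2).1,
            (pvDfs map (map.flatten.length + 1) r c st.2).2)
        else st) st).2) := by
    intro r hr1 hr2 cs
    induction cs with
    | nil => intro _ st hg; exact ⟨by simp, hg⟩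
    | cons c t iht =>
      intro hcs st hg
      obtain ⟨hc1, hc2⟩ := hcs c List.mem_cons_self
      simp only [List.foldl_cons, List.map_cons, List.sum_cons]
      by_cases h0 : pvCell map r c = 0
      · have hok : pvOk map r c := ⟨hr1, hr2, hc1, hc2⟩
        obtain ⟨r1, r2⟩ := pvDfs_correct map (pvM map (pvCell map r c))
          (map.flatten.length + 1) r c st.2 hok le_rfl (Nat.lt_succ_of_le (pvM_le map _)) hg
        simp only [if_pos h0]
        obtain ⟨w1, w2⟩ := iht (fun c hc => hcs c (List.mem_cons_of_mem _ hc))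
          (st.1 + (pvDfs map (map.flatten.length + 1) r c st.2).1,
            (pvDfs map (map.flatten.length + 1) r c st.2).2) r2
        refine ⟨?_, w2⟩
        rw [w1]; simp only [r1]; ring
      · simp only [if_neg h0]
        obtain ⟨w1, w2⟩ := iht (fun c hc => hcs c (List.mem_cons_of_mem _ hc)) st hg
        exact ⟨by rw [w1]; ring, w2⟩
  have houter : ∀ (rs : List Int), (∀ r ∈ rs, 0 ≤ r ∧ r < (map.length : Int)) →
      ∀ (st : Int × PySem.Dict (Int × Int) Int), pvGood map st.2 →
      (rs.foldl (fun (st : Int × PySem.Dict (Int × Int) Int) r =>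
        (PySem.List.pyRange 0 (PySem.List.len (map.getD r.toNat [])) 1).foldl
          (fun st c =>
            if pvCell map r c = 0 then
              (st.1 + (pvDfs map (map.flatten.length + 1) r c st.2).1,
                (pvDfs map (map.flatten.length + 1) r c st.2).2)
            else st) st) st).1 =
        st.1 + (rs.map (fun r =>
          ((PySem.List.pyRange 0 (PySem.List.len (map.getD r.toNat [])) 1).map (fun c =>
            if pvCell map r c = 0 then pvTR map r c else 0)).sum)).sum := by
    intro rs
    induction rs with
    | nil => intro _ st _; simp
    | cons r t iht =>
      intro hrs st hg
      obtain ⟨hr1, hr2⟩ := hrs r List.mem_cons_self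
      simp only [List.foldl_cons, List.map_cons, List.sum_cons]
      have hbound : ∀ c ∈ PySem.List.pyRange 0 (PySem.List.len (map.getD r.toNat [])) 1,
          0 ≤ c ∧ c < ((map.getD r.toNat []).length : Int) := by
        intro c hc
        have := (PySem.List.mem_pyRange_one).mp hc
        rw [PySem.List.len_eq] at this
        exact ⟨this.1, by exact_mod_cast this.2⟩
      obtain ⟨w1, w2⟩ := hinner r hr1 hr2 _ hbound st hg
      rw [iht (fun r hr => hrs r (List.mem_cons_of_mem _ hr)) _ w2, w1]
      ring
  have hrs : ∀ r ∈ PySem.List.pyRange 0 (PySem.List.len map) 1, 0 ≤ r ∧ r < (map.length : Int) := by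
    intro r hr
    have := (PySem.List.mem_pyRange_one).mp hr
    rw [PySem.List.len_eq] at this
    exact ⟨this.1, by exact_mod_cast this.2⟩
  have := houter _ hrs (0, PySem.Dict.empty) (pvGood_empty map)
  simp only [part_two, pvAns]
  rw [this]
  ring

-- ===== B-side =====
-- the table is complete for every cell whose value satisfies W
def pvDone (map : List (List Int)) (W : Int → Prop) (d : PySem.Dict (Int × Int) Int) : Prop :=
  ∀ i j : Int, pvOk map i j → W (pvCell map i j) → d.get? (i, j) = some (pvTR map i j)

-- value of B's four-neighbour sum, read off a table complete above v
lemma pvNbrSum (map : List (List Int)) (i j v : Int) (rt : PySem.Dict (Int × Int) Int)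
    (hnb : ∀ nr nc : Int, pvOk map nr nc → pvCell map nr nc = v + 1 →
      rt.get? (nr, nc) = some (pvTR map nr nc))
    (hok : pvOk map i j) (hcv : pvCell map i j = v) (h9 : v ≠ 9) :
    pvDirs.foldl (fun (s : Int) d =>
      if 0 ≤ i + d.1 ∧ i + d.1 < PySem.List.len map ∧ 0 ≤ j + d.2 ∧
          j + d.2 < PySem.List.len (map.getD (i + d.1).toNat []) ∧
          pvCell map (i + d.1) (j + d.2) = v + 1 then
        s + rt.getD (i + d.1, j + d.2) 0
      else s) 0 = pvTR map i j := by
  have hsum : ∀ (l : List (Int × Int)) (s0 : Int),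
      l.foldl (fun (s : Int) d =>
        if 0 ≤ i + d.1 ∧ i + d.1 < PySem.List.len map ∧ 0 ≤ j + d.2 ∧
            j + d.2 < PySem.List.len (map.getD (i + d.1).toNat []) ∧
            pvCell map (i + d.1) (j + d.2) = v + 1 then
          s + rt.getD (i + d.1, j + d.2) 0
        else s) s0 =
      s0 + (l.map (fun d =>
        if 0 ≤ i + d.1 ∧ i + d.1 < PySem.List.len map ∧ 0 ≤ j + d.2 ∧
            j + d.2 < PySem.List.len (map.getD (i + d.1).toNat []) ∧
            pvCell map (i + d.1) (j + d.2) = v + 1 then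
          rt.getD (i + d.1, j + d.2) 0
        else 0)).sum := by
    intro l
    induction l with
    | nil => intro s0; simp
    | cons d t iht =>
      intro s0
      simp only [List.foldl_cons, List.map_cons, List.sum_cons]
      by_cases hc : 0 ≤ i + d.1 ∧ i + d.1 < PySem.List.len map ∧ 0 ≤ j + d.2 ∧
          j + d.2 < PySem.List.len (map.getD (i + d.1).toNat []) ∧
          pvCell map (i + d.1) (j + d.2) = v + 1
      · rw [if_pos hc, if_pos hc, iht]; ring
      · rw [if_neg hc, if_neg hc, iht]; ring
  rw [hsum, zero_add, pvTR_unfold map i j hok (by rw [hcv]; exact h9)]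
  congr 1
  apply List.map_congr_left
  intro d _
  rw [hcv]
  by_cases hc : 0 ≤ i + d.1 ∧ i + d.1 < PySem.List.len map ∧ 0 ≤ j + d.2 ∧
      j + d.2 < PySem.List.len (map.getD (i + d.1).toNat []) ∧
      pvCell map (i + d.1) (j + d.2) = v + 1
  · rw [if_pos hc, if_pos hc]
    obtain ⟨c1, c2, c3, c4, c5⟩ := hc
    rw [PySem.List.len_eq] at c2 c4
    have hokn : pvOk map (i + d.1) (j + d.2) := ⟨c1, by exact_mod_cast c2, c3, by exact_mod_cast c4⟩
    rw [PySem.Dict.getD_eq_get?_getD, hnb _ _ hokn c5]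
    rfl
  · rw [if_neg hc, if_neg hc]

-- one pass over the value-sorted cell list completes the whole table
lemma pvCellsPass (map : List (List Int)) :
    ∀ (l : List (Int × Int × Int)),
      (∀ t ∈ l, pvOk map t.2.1 t.2.2 ∧ t.1 = pvCell map t.2.1 t.2.2) →
      l.Pairwise (fun a b => b.1 ≤ a.1) →
      ∀ (rt : PySem.Dict (Int × Int) Int), pvGood map rt →
      (∀ i j : Int, pvOk map i j → (pvCell map i j, i, j) ∉ l →
        rt.get? (i, j) = some (pvTR map i j)) →
      pvGood map (l.foldl (fun (rt : PySem.Dict (Int × Int) Int) t =>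
        if t.1 = 9 then rt.insert (t.2.1, t.2.2) 1
        else rt.insert (t.2.1, t.2.2) (pvDirs.foldl (fun (s : Int) d =>
          if 0 ≤ t.2.1 + d.1 ∧ t.2.1 + d.1 < PySem.List.len map ∧ 0 ≤ t.2.2 + d.2 ∧
              t.2.2 + d.2 < PySem.List.len (map.getD (t.2.1 + d.1).toNat []) ∧
              pvCell map (t.2.1 + d.1) (t.2.2 + d.2) = t.1 + 1 then
            s + rt.getD (t.2.1 + d.1, t.2.2 + d.2) 0
          else s) 0)) rt) ∧
      (∀ i j : Int, pvOk map i j → (l.foldl (fun (rt : PySem.Dict (Int × Int) Int) t =>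
        if t.1 = 9 then rt.insert (t.2.1, t.2.2) 1
        else rt.insert (t.2.1, t.2.2) (pvDirs.foldl (fun (s : Int) d =>
          if 0 ≤ t.2.1 + d.1 ∧ t.2.1 + d.1 < PySem.List.len map ∧ 0 ≤ t.2.2 + d.2 ∧
              t.2.2 + d.2 < PySem.List.len (map.getD (t.2.1 + d.1).toNat []) ∧
              pvCell map (t.2.1 + d.1) (t.2.2 + d.2) = t.1 + 1 then
            s + rt.getD (t.2.1 + d.1, t.2.2 + d.2) 0
          else s) 0)) rt).get? (i, j) = some (pvTR map i j)) := by
  intro l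
  induction l with
  | nil =>
    intro _ _ rt hg hcomp
    exact ⟨hg, fun i j hok => hcomp i j hok (by simp)⟩
  | cons t l' ihl =>
    intro htri hsort rt hg hcomp
    obtain ⟨hok, hcv⟩ := htri t List.mem_cons_self
    have hle : ∀ b ∈ l', b.1 ≤ t.1 := (List.pairwise_cons.mp hsort).1
    have hsort' := (List.pairwise_cons.mp hsort).2
    -- every value-(t.1 + 1) cell is outside t :: l', hence already in the table
    have hnb : ∀ nr nc : Int, pvOk map nr nc → pvCell map nr nc = t.1 + 1 →
        rt.get? (nr, nc) = some (pvTR map nr nc) := by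
      intro nr nc hokn hcn
      refine hcomp nr nc hokn ?_
      intro hm
      rcases List.mem_cons.mp hm with he | hm'
      · have : pvCell map nr nc = t.1 := by rw [← he]
        omega
      · have := hle _ hm'
        simp only at this
        omega
    -- the value inserted for t is the true rating
    have hval : (if t.1 = 9 then (1 : Int) else pvDirs.foldl (fun (s : Int) d =>
        if 0 ≤ t.2.1 + d.1 ∧ t.2.1 + d.1 < PySem.List.len map ∧ 0 ≤ t.2.2 + d.2 ∧
            t.2.2 + d.2 < PySem.List.len (map.getD (t.2.1 + d.1).toNat []) ∧
            pvCell map (t.2.1 + d.1) (t.2.2 + d.2) = t.1 + 1 then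
          s + rt.getD (t.2.1 + d.1, t.2.2 + d.2) 0
        else s) 0) = pvTR map t.2.1 t.2.2 := by
      by_cases h9 : t.1 = 9
      · rw [if_pos h9, pvTR_nine map _ _ (by rw [← hcv, h9])]
      · rw [if_neg h9]
        exact pvNbrSum map t.2.1 t.2.2 t.1 rt hnb hok hcv.symm h9
    have hstep : (if t.1 = 9 then rt.insert (t.2.1, t.2.2) 1
        else rt.insert (t.2.1, t.2.2) (pvDirs.foldl (fun (s : Int) d =>
          if 0 ≤ t.2.1 + d.1 ∧ t.2.1 + d.1 < PySem.List.len map ∧ 0 ≤ t.2.2 + d.2 ∧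
              t.2.2 + d.2 < PySem.List.len (map.getD (t.2.1 + d.1).toNat []) ∧
              pvCell map (t.2.1 + d.1) (t.2.2 + d.2) = t.1 + 1 then
            s + rt.getD (t.2.1 + d.1, t.2.2 + d.2) 0
          else s) 0)) = rt.insert (t.2.1, t.2.2) (pvTR map t.2.1 t.2.2) := by
      by_cases h9 : t.1 = 9
      · rw [if_pos h9, ← hval, if_pos h9]
      · rw [if_neg h9, ← hval, if_neg h9]
    simp only [List.foldl_cons, hstep]
    have hg1 : pvGood map (rt.insert (t.2.1, t.2.2) (pvTR map t.2.1 t.2.2)) :=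
      pvGood_insert map rt t.2.1 t.2.2 _ hg hok rfl
    refine ihl (fun t ht => htri t (List.mem_cons_of_mem _ ht)) hsort' _ hg1 ?_
    intro i j hokij hnotin
    by_cases hkey : (i, j) = (t.2.1, t.2.2)
    · have h1 : i = t.2.1 := (Prod.ext_iff.mp hkey).1
      have h2 : j = t.2.2 := (Prod.ext_iff.mp hkey).2
      rw [h1, h2, PySem.Dict.get?_insert, if_pos rfl]
    · refine pvGood_insert_get? map rt (t.2.1, t.2.2) hg (i, j) _ ?_
      refine hcomp i j hokij ?_
      intro hm
      rcases List.mem_cons.mp hm with he | hm'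
      · apply hkey
        rw [← he]
      · exact hnotin hm'

-- rows of the enumerated grid come with their bounds
lemma pvRowsFact (map : List (List Int)) : ∀ p ∈ PySem.List.enumerate map,
    0 ≤ p.1 ∧ p.1 < (map.length : Int) ∧ p.2 = map.getD p.1.toNat [] := by
  intro p hp
  obtain ⟨k, hk, rfl⟩ := (PySem.List.mem_enumerate_iff _ _ _).mp hp
  refine ⟨by omega, by push_cast; omega, ?_⟩
  show map[k] = map.getD ((0 + (k : Int))).toNat []
  have hknat : ((0 : Int) + (k : Int)).toNat = k := by omega
  rw [hknat, List.getD_eq_getElem _ _ hk]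

lemma pvEnumRowFact (map : List (List Int)) (p : Int × List Int)
    (hp3 : p.2 = map.getD p.1.toNat []) : ∀ q ∈ PySem.List.enumerate p.2,
    0 ≤ q.1 ∧ q.1 < ((map.getD p.1.toNat []).length : Int) ∧ q.2 = pvCell map p.1 q.1 := by
  intro q hq
  obtain ⟨k, hk, rfl⟩ := (PySem.List.mem_enumerate_iff _ _ _).mp hq
  refine ⟨by omega, by rw [← hp3]; push_cast; omega, ?_⟩
  show p.2[k] = pvCell map p.1 (0 + (k : Int))
  have hknat : ((0 : Int) + (k : Int)).toNat = k := by omega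
  rw [pvCell, ← hp3, hknat, List.getD_eq_getElem _ _ hk]

lemma part_two_alt_eq_ans (map : List (List Int)) : part_two_alt map = pvAns map := by
  -- the final summation loop, for any complete table rt
  have hrowSum : ∀ (rt : PySem.Dict (Int × Int) Int),
      pvDone map (fun w => w ∈ map.flatten) rt → ∀ (i : Int), 0 ≤ i → i < (map.length : Int) →
      ∀ (l : List (Int × Int)),
      (∀ q ∈ l, 0 ≤ q.1 ∧ q.1 < ((map.getD i.toNat []).length : Int) ∧ q.2 = pvCell map i q.1) →
      ∀ (acc : Int), l.foldl (fun acc jx => if jx.2 = 0 then acc + rt.getD (i, jx.1) 0 else acc) acc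
        = acc + (l.map (fun jx => if jx.2 = 0 then pvTR map i jx.1 else 0)).sum := by
    intro rt hD i hi1 hi2 l
    induction l with
    | nil => intro _ acc; simp
    | cons q t iht =>
      intro hmem acc
      obtain ⟨hq1, hq2, hq3⟩ := hmem q List.mem_cons_self
      simp only [List.foldl_cons, List.map_cons, List.sum_cons]
      by_cases h0 : q.2 = 0
      · have hok : pvOk map i q.1 := ⟨hi1, hi2, hq1, hq2⟩
        have := hD i q.1 hok (pvCell_mem_flatten map i q.1 hok)
        rw [if_pos h0, if_pos h0, PySem.Dict.getD_eq_get?_getD, this,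
          iht (fun q hq => hmem q (List.mem_cons_of_mem _ hq))]
        show acc + pvTR map i q.1 + _ = _
        ring
      · rw [if_neg h0, if_neg h0, iht (fun q hq => hmem q (List.mem_cons_of_mem _ hq))]
        ring
  have hgridSum : ∀ (rt : PySem.Dict (Int × Int) Int),
      pvDone map (fun w => w ∈ map.flatten) rt → ∀ (l : List (Int × List Int)),
      (∀ p ∈ l, 0 ≤ p.1 ∧ p.1 < (map.length : Int) ∧ p.2 = map.getD p.1.toNat []) →
      ∀ (acc : Int), l.foldl (fun acc iRow => (PySem.List.enumerate iRow.2).foldl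
          (fun acc jx => if jx.2 = 0 then acc + rt.getD (iRow.1, jx.1) 0 else acc) acc) acc
        = acc + (l.map (fun iRow => ((PySem.List.enumerate iRow.2).map
            (fun jx => if jx.2 = 0 then pvTR map iRow.1 jx.1 else 0)).sum)).sum := by
    intro rt hD l
    induction l with
    | nil => intro _ acc; simp
    | cons p t iht =>
      intro hmem acc
      obtain ⟨hp1, hp2, hp3⟩ := hmem p List.mem_cons_self
      simp only [List.foldl_cons, List.map_cons, List.sum_cons]
      rw [hrowSum rt hD p.1 hp1 hp2 _ (pvEnumRowFact map p hp3) acc,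
        iht (fun p hp => hmem p (List.mem_cons_of_mem _ hp))]
      ring
  -- the enumerated sum is pvAns
  have hconv : ((PySem.List.enumerate map).map (fun p => ((PySem.List.enumerate p.2).map
      (fun jx => if jx.2 = 0 then pvTR map p.1 jx.1 else 0)).sum)).sum = pvAns map := by
    rw [pvAns, PySem.List.enumerate_eq_map_pyRange map [], List.map_map]
    congr 1
    apply List.map_congr_left
    intro r hr
    have hrb := (PySem.List.mem_pyRange_one).mp hr
    rw [PySem.List.len_eq] at hrb
    have hr2 : r < (map.length : Int) := by exact_mod_cast hrb.2
    have hrnat : r.toNat < map.length := by omega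
    show ((PySem.List.enumerate (PySem.List.pyGetD map r [])).map
      (fun jx => if jx.2 = 0 then pvTR map r jx.1 else 0)).sum = _
    have hrow : PySem.List.pyGetD map r [] = map.getD r.toNat [] := by
      rw [PySem.List.pyGetD_eq_getElem map [] hrb.1 hr2, List.getD_eq_getElem map [] hrnat]
    rw [hrow, PySem.List.enumerate_eq_map_pyRange (map.getD r.toNat []) 0, List.map_map]
    congr 1
    apply List.map_congr_left
    intro c hc
    have hcb := (PySem.List.mem_pyRange_one).mp hc
    rw [PySem.List.len_eq] at hcb
    have hc2 : c < ((map.getD r.toNat []).length : Int) := by exact_mod_cast hcb.2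
    have hcnat : c.toNat < (map.getD r.toNat []).length := by omega
    show (if PySem.List.pyGetD (map.getD r.toNat []) c 0 = 0 then pvTR map r c else 0) = _
    have hcell : PySem.List.pyGetD (map.getD r.toNat []) c 0 = pvCell map r c := by
      rw [PySem.List.pyGetD_eq_getElem (map.getD r.toNat []) 0 hcb.1 hc2, pvCell,
        List.getD_eq_getElem _ 0 hcnat]
    rw [hcell]
  -- membership facts for the flattened cell list
  have hcellmem : ∀ (i j : Int), pvOk map i j →
      (pvCell map i j, i, j) ∈ (PySem.List.enumerate map).flatMap (fun iRow =>
        (PySem.List.enumerate iRow.2).map (fun jx => (jx.2, iRow.1, jx.1))) := by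
    intro i j hok
    obtain ⟨ho1, ho2, ho3, ho4⟩ := hok
    have hi : i.toNat < map.length := by omega
    have hj : j.toNat < (map.getD i.toNat []).length := by omega
    have hj' : j.toNat < (map[i.toNat]).length := by
      rw [← List.getD_eq_getElem map [] hi]; exact hj
    refine List.mem_flatMap.mpr ⟨((0 : Int) + (i.toNat : Int), map[i.toNat]),
      (PySem.List.mem_enumerate_iff _ _ _).mpr ⟨i.toNat, hi, rfl⟩, ?_⟩
    refine List.mem_map.mpr ⟨((0 : Int) + (j.toNat : Int), (map[i.toNat])[j.toNat]),
      (PySem.List.mem_enumerate_iff _ _ _).mpr ⟨j.toNat, hj', rfl⟩, ?_⟩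
    have hi0 : (0 : Int) + (i.toNat : Int) = i := by omega
    have hj0 : (0 : Int) + (j.toNat : Int) = j := by omega
    have hcell : (map[i.toNat])[j.toNat] = pvCell map i j := by
      rw [pvCell, List.getD_eq_getElem map [] hi, List.getD_eq_getElem _ 0 hj']
    rw [hi0, hj0, hcell]
  have htri : ∀ t ∈ PySem.List.sorted ((PySem.List.enumerate map).flatMap (fun iRow =>
      (PySem.List.enumerate iRow.2).map (fun jx => (jx.2, iRow.1, jx.1)))) (fun t => t.1) true,
      pvOk map t.2.1 t.2.2 ∧ t.1 = pvCell map t.2.1 t.2.2 := by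
    intro t ht
    have ht' := ((PySem.List.sorted_perm _ _ true).mem_iff).mp ht
    obtain ⟨p, hp, ht2⟩ := List.mem_flatMap.mp ht'
    obtain ⟨q, hq, rfl⟩ := List.mem_map.mp ht2
    obtain ⟨hp1, hp2, hp3⟩ := pvRowsFact map p hp
    obtain ⟨hq1, hq2, hq3⟩ := pvEnumRowFact map p hp3 q hq
    exact ⟨⟨hp1, hp2, hq1, hq2⟩, hq3⟩
  have hsort : (PySem.List.sorted ((PySem.List.enumerate map).flatMap (fun iRow =>
      (PySem.List.enumerate iRow.2).map (fun jx => (jx.2, iRow.1, jx.1)))) (fun t => t.1)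
      true).Pairwise (fun a b => b.1 ≤ a.1) :=
    PySem.List.sorted_pairwise_rev _ _
  obtain ⟨gG, gD⟩ := pvCellsPass map _ htri hsort PySem.Dict.empty (pvGood_empty map)
    (by intro i j hok hnot
        exact absurd (((PySem.List.sorted_perm _ _ true).mem_iff).mpr (hcellmem i j hok)) hnot)
  simp only [part_two_alt]
  rw [hgridSum _ (fun i j hok _ => gD i j hok) (PySem.List.enumerate map) (pvRowsFact map) 0,
    zero_add, hconv]

-- ===== VERDICT (by name: the statement is the Claim_ definition above) =====
theorem part_two_spec : Claim_equal_part_two := by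
  intro map _
  unfold Spec_part_two
  rw [part_two_eq_ans, part_two_alt_eq_ans]
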